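-- pv_equiv track=rewrite | github.com/emilywei4/bioinformatics-portfolio | Sequence Parsing & QC/string_indexing_advanced/multiple_pattern_matching.py | preprocess_bwt
-- ===== SOURCE A (Python) =====
-- from typing import List, Dict, Iterable, Tuple
--
-- def preprocess_bwt(bwt: str) -> Tuple[Dict[str, int], List[Dict[str, int]]]:
--     """
--     Compute: firstColOccurrence (map each character to its first occurrence in the first column) and count array(cumulative counts of each character up to that index).
--     """
--     length = len(bwt)
--     firstCol = sorted(bwt)
--     firstColOccurrence = {}
--     for i, char in enumerate(firstCol):
--         if char not in firstColOccurrence: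
--             firstColOccurrence[char] = i
--
--     count = []
--     curr = {}
--     for i in range(length + 1):
--         count.append(curr.copy()) #append copy of current count to dictionary, so we can update original and move to next
--         if i < length:
--             char = bwt[i]
--             curr[char] = curr.get(char, 0) + 1
--
--     return firstColOccurrence, count
-- ===== SOURCE B (Python) =====
-- def preprocess_bwt(bwt):
--     # frequency pass + prefix sums over the sorted distinct characters,
--     # instead of sorting the whole string and scanning it
--     freq = {}
--     for ch in bwt:
--         freq[ch] = freq.get(ch, 0) + 1
--
--     firstColOccurrence = {}
--     total = 0
--     for ch in sorted(freq):
--         firstColOccurrence[ch] = total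
--         total += freq[ch]
--
--     count = [{}]
--     curr = {}
--     for ch in bwt:
--         curr = dict(curr)
--         curr[ch] = curr.get(ch, 0) + 1
--         count.append(curr)
--
--     return firstColOccurrence, count
-- ===== Notes on version B (the rewrite author's own statement) =====
-- stated objective: alternative
-- what changed: first-column occurrence map is computed by a frequency-count pass plus prefix sums over the sorted distinct characters instead of sorting the whole string and scanning it with enumerate; the cumulative-count list is built by appending each updated copy directly instead of indexing with range(length+1) and a trailing-iteration guard.
import Mathlib
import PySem

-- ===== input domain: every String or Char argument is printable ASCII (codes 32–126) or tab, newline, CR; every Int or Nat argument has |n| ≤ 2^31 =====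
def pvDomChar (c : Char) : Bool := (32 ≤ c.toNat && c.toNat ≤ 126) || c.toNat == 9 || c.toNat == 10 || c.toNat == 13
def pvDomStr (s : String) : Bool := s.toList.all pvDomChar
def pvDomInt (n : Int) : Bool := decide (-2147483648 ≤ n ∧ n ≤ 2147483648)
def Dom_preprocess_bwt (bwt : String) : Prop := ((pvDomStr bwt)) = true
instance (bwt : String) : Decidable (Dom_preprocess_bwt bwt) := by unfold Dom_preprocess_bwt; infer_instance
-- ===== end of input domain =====

-- B replaces A's sort-the-whole-string + enumerate scan by a frequency-count pass with
-- prefix sums over the sorted distinct characters, and builds the cumulative-count list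
-- by direct appends instead of indexed range iteration (objective: alternative algorithm).


-- one-character Python string (bwt[i] / iteration over a str yields 1-char strings)
def pvS1 (c : Char) : String := String.ofList [c]

-- ===== PORT A =====
def preprocess_bwt (bwt : String) : (List (String × Int)) × (List (List (String × Int))) :=
  let length : Int := PySem.Str.len bwt
  let firstCol : List String := PySem.List.sorted (bwt.toList.map pvS1) (fun c => c) false
  let firstColOccurrence : PySem.Dict String Int :=
    (PySem.List.enumerate firstCol 0).foldl
      (fun d p => if d.contains p.2 then d else d.insert p.2 p.1) PySem.Dict.empty
  let st :=
    (PySem.List.pyRange 0 (length + 1) 1).foldl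
      (fun (st : List (PySem.Dict String Int) × PySem.Dict String Int) i =>
        let count := st.1 ++ [st.2]
        if i < length then
          -- bwt[i]: the guard ensures 0 ≤ i < length, so pyGetD equals Python's bwt[i]
          (count, st.2.modify (pvS1 (PySem.List.pyGetD bwt.toList i ' ')) 0 (· + 1))
        else (count, st.2))
      ([], PySem.Dict.empty)
  (firstColOccurrence.items, st.1.map (fun d => d.items))

-- ===== PORT B =====
def preprocess_bwt_alt (bwt : String) : (List (String × Int)) × (List (List (String × Int))) :=
  let freq : PySem.Dict String Int :=
    bwt.toList.foldl (fun d c => d.modify (pvS1 c) 0 (· + 1)) PySem.Dict.empty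
  let fco :=
    (PySem.List.sorted freq.keys (fun k => k) false).foldl
      (fun (st : PySem.Dict String Int × Int) k => (st.1.insert k st.2, st.2 + freq.getD k 0))
      (PySem.Dict.empty, 0)
  let cs :=
    bwt.toList.foldl
      (fun (st : List (PySem.Dict String Int) × PySem.Dict String Int) c =>
        -- dict(curr) is a value copy; curr[ch] = curr.get(ch, 0) + 1
        let curr := st.2.modify (pvS1 c) 0 (· + 1)
        (st.1 ++ [curr], curr))
      ([PySem.Dict.empty], PySem.Dict.empty)
  (fco.1.items, cs.1.map (fun d => d.items))

-- ===== PRECONDITION & SPEC =====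
def Spec_preprocess_bwt (bwt : String) (out : (List (String × Int)) × (List (List (String × Int)))) : Prop := out = preprocess_bwt_alt bwt
instance (bwt : String) (out : (List (String × Int)) × (List (List (String × Int)))) : Decidable (Spec_preprocess_bwt bwt out) := by unfold Spec_preprocess_bwt; infer_instance

-- ===== CLAIM (what is proved, stated in full; the proofs are below) =====
def Claim_equal_preprocess_bwt : Prop := ∀ (bwt : String), Dom_preprocess_bwt bwt → Spec_preprocess_bwt bwt (preprocess_bwt bwt)

-- ===== LEMMAS AND PROOFS =====

-- canonical first-occurrence table of a nondecreasing list, by runs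
def canonFCO : List String → Int → List (String × Int)
  | [], _ => []
  | c :: t, i => (c, i) :: canonFCO (t.filter (fun x => x ≠ c)) (i + 1 + (t.count c : Int))
termination_by ys => ys.length
decreasing_by
  simp only [List.length_cons, List.length_unattach]
  exact Nat.lt_succ_of_le (le_trans (List.length_filter_le _ _) (by simp))

-- B's prefix-sum table over a key list
def bSpec (cnt : String → Int) : List String → Int → List (String × Int)
  | [], _ => []
  | k :: t, tot => (k, tot) :: bSpec cnt t (tot + cnt k)

theorem pv_run_decomp : ∀ (t : List String) (c : String), (∀ x ∈ t, c ≤ x) → t.Pairwise (· ≤ ·) →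
    t = List.replicate (t.count c) c ++ t.filter (fun x => x ≠ c) ∧
    ∀ x ∈ t.filter (fun x => x ≠ c), c < x := by
  intro t
  induction t with
  | nil => intro c _ _; simp
  | cons x t ih =>
    intro c hle hp
    rcases List.pairwise_cons.1 hp with ⟨hxt, hpt⟩
    by_cases hxc : x = c
    · subst hxc
      have hle' : ∀ y ∈ t, x ≤ y := hxt
      rcases ih x hle' hpt with ⟨h1, h2⟩
      constructor
      · simpa [List.count_cons, List.replicate_succ] using congrArg (x :: ·) h1
      · simpa using h2
    · have hcx : c < x := lt_of_le_of_ne (hle x (by simp)) (Ne.symm hxc)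
      have hct : ∀ y ∈ t, c < y := fun y hy => lt_of_lt_of_le hcx (hxt y hy)
      have hcount : (x :: t).count c = 0 := by
        simp only [List.count_eq_zero]
        intro hc
        rcases List.mem_cons.1 hc with h | h
        · exact hxc h.symm
        · exact absurd rfl (ne_of_gt (hct c h))
      have hfilt : (x :: t).filter (fun y => y ≠ c) = x :: t := by
        rw [List.filter_eq_self]
        intro y hy
        rcases List.mem_cons.1 hy with h | h
        · subst h; simpa using hxc
        · simpa using ne_of_gt (hct y h)
      refine ⟨by
        rw [hcount]
        simpa using hfilt.symm, ?_⟩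
      rw [hfilt]
      intro y hy
      rcases List.mem_cons.1 hy with h | h
      · subst h; exact hcx
      · exact hct y h

theorem pv_skip_run (c : String) : ∀ (m : Nat) (j : Int) (d : PySem.Dict String Int), d.contains c = true →
    (PySem.List.enumerate (List.replicate m c) j).foldl
      (fun d p => if d.contains p.2 then d else d.insert p.2 p.1) d = d := by
  intro m
  induction m with
  | zero => intro j d _; simp [PySem.List.enumerate_nil]
  | succ n ih =>
    intro j d hd
    rw [List.replicate_succ, PySem.List.enumerate_cons]
    simp only [List.foldl_cons, hd, if_true]
    exact ih (j + 1) d hd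

theorem pv_lemmaA : ∀ (ys : List String), ys.Pairwise (· ≤ ·) →
    ∀ (i : Int) (d : PySem.Dict String Int), (∀ x ∈ ys, d.contains x = false) →
    ((PySem.List.enumerate ys i).foldl
      (fun d p => if d.contains p.2 then d else d.insert p.2 p.1) d).items
    = d.items ++ canonFCO ys i := by
  have main : ∀ (n : Nat) (ys : List String), ys.length ≤ n → ys.Pairwise (· ≤ ·) →
      ∀ (i : Int) (d : PySem.Dict String Int), (∀ x ∈ ys, d.contains x = false) →
      ((PySem.List.enumerate ys i).foldl
        (fun d p => if d.contains p.2 then d else d.insert p.2 p.1) d).items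
      = d.items ++ canonFCO ys i := by
    intro n
    induction n with
    | zero =>
      intro ys hlen _ i d _
      have : ys = [] := List.eq_nil_of_length_eq_zero (Nat.le_zero.1 hlen)
      subst this
      simp [PySem.List.enumerate_nil, canonFCO]
    | succ n ih =>
      intro ys hlen hp i d hd
      match ys, hlen, hp, hd with
      | [], _, _, _ => simp [PySem.List.enumerate_nil, canonFCO]
      | c :: t, hlen, hp, hd =>
        rcases List.pairwise_cons.1 hp with ⟨hct, hpt⟩
        rcases pv_run_decomp t c hct hpt with ⟨hdec, hgt⟩
        have hdc : d.contains c = false := hd c (by simp)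
        have hstep : (if d.contains c then d else d.insert c i) = d.insert c i := by
          rw [hdc]; simp
        have hins : (d.insert c i).items = d.items ++ [(c, i)] :=
          PySem.Dict.items_insert_of_not_contains d i hdc
        have hd' : ∀ x ∈ t.filter (fun x => x ≠ c), (d.insert c i).contains x = false := by
          intro x hx
          rw [PySem.Dict.contains_insert]
          have hxc : x ≠ c := ne_of_gt (hgt x hx)
          have hxt : x ∈ t := List.mem_of_mem_filter hx
          simp [hxc, hd x (List.mem_cons_of_mem _ hxt)]
        have hlen' : (t.filter (fun x => x ≠ c)).length ≤ n := by
          have h1 : (t.filter (fun x => x ≠ c)).length ≤ t.length := List.length_filter_le _ _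
          have h2 : t.length ≤ n := by simpa using Nat.le_of_succ_le_succ hlen
          omega
        have hpt' : (t.filter (fun x => x ≠ c)).Pairwise (· ≤ ·) := List.Pairwise.filter _ hpt
        calc ((PySem.List.enumerate (c :: t) i).foldl
              (fun d p => if d.contains p.2 then d else d.insert p.2 p.1) d).items
            = ((PySem.List.enumerate (t.filter (fun x => x ≠ c)) (i + 1 + (t.count c : Int))).foldl
                (fun d p => if d.contains p.2 then d else d.insert p.2 p.1) (d.insert c i)).items := by
              conv_lhs => rw [PySem.List.enumerate_cons, List.foldl_cons, hstep]
              conv_lhs => rw [show t = List.replicate (t.count c) c ++ t.filter (fun x => x ≠ c) from hdec]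
              rw [PySem.List.enumerate_append, List.foldl_append,
                pv_skip_run c (t.count c) (i + 1) (d.insert c i) (PySem.Dict.contains_insert_self d c i)]
              norm_num
          _ = (d.insert c i).items ++ canonFCO (t.filter (fun x => x ≠ c)) (i + 1 + (t.count c : Int)) :=
              ih _ hlen' hpt' _ _ hd'
          _ = d.items ++ canonFCO (c :: t) i := by
              rw [hins, canonFCO]
              simp
  exact fun ys hp i d hd => main ys.length ys le_rfl hp i d hd

theorem pv_bfold (cnt : String → Int) (freq : PySem.Dict String Int)
    (hc : ∀ k, freq.getD k 0 = cnt k) :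
    ∀ (ks : List String) (d : PySem.Dict String Int) (tot : Int),
    (∀ k ∈ ks, d.contains k = false) → ks.Nodup →
    ((ks.foldl (fun st k => (st.1.insert k st.2, st.2 + freq.getD k 0)) (d, tot)).1).items
    = d.items ++ bSpec cnt ks tot := by
  intro ks
  induction ks with
  | nil => intro d tot _ _; simp [bSpec]
  | cons k t ih =>
    intro d tot hfresh hnd
    rcases List.nodup_cons.1 hnd with ⟨hkt, hndt⟩
    have hk : d.contains k = false := hfresh k (by simp)
    have hfresh' : ∀ k' ∈ t, (d.insert k tot).contains k' = false := by
      intro k' hk'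
      rw [PySem.Dict.contains_insert]
      have : k' ≠ k := fun h => hkt (h ▸ hk')
      simp [this, hfresh k' (List.mem_cons_of_mem _ hk')]
    rw [List.foldl_cons]
    have := ih (d.insert k tot) (tot + freq.getD k 0) hfresh' hndt
    rw [this, PySem.Dict.items_insert_of_not_contains d tot hk, hc k, bSpec]
    simp

theorem pv_canon_bspec : ∀ (ys ks : List String) (i : Int) (cnt : String → Int),
    ys.Pairwise (· ≤ ·) → ks.Pairwise (· < ·) → (∀ x, x ∈ ks ↔ x ∈ ys) →
    (∀ k ∈ ks, cnt k = (ys.count k : Int)) → canonFCO ys i = bSpec cnt ks i := by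
  have main : ∀ (n : Nat) (ys ks : List String), ys.length ≤ n → ∀ (i : Int) (cnt : String → Int),
      ys.Pairwise (· ≤ ·) → ks.Pairwise (· < ·) → (∀ x, x ∈ ks ↔ x ∈ ys) →
      (∀ k ∈ ks, cnt k = (ys.count k : Int)) → canonFCO ys i = bSpec cnt ks i := by
    intro n
    induction n with
    | zero =>
      intro ys ks hlen i cnt _ _ hmem _
      have hys : ys = [] := List.eq_nil_of_length_eq_zero (Nat.le_zero.1 hlen)
      subst hys
      have hks : ks = [] := List.eq_nil_iff_forall_not_mem.2 (fun x hx => by simpa using (hmem x).1 hx)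
      subst hks
      simp [canonFCO, bSpec]
    | succ n ih =>
      intro ys ks hlen i cnt hp hq hmem hcnt
      match ys, hlen, hp, hmem, hcnt with
      | [], _, _, hmem, _ =>
        have hks : ks = [] := List.eq_nil_iff_forall_not_mem.2 (fun x hx => by simpa using (hmem x).1 hx)
        subst hks
        simp [canonFCO, bSpec]
      | c :: t, hlen, hp, hmem, hcnt =>
        rcases List.pairwise_cons.1 hp with ⟨hct, hpt⟩
        rcases pv_run_decomp t c hct hpt with ⟨hdec, hgt⟩
        -- ks is nonempty with head c
        have hcks : c ∈ ks := (hmem c).2 (by simp)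
        match ks, hq, hmem, hcnt, hcks with
        | k :: ks', hq, hmem, hcnt, hcks =>
          rcases List.pairwise_cons.1 hq with ⟨hkks, hqks⟩
          have hkc : k = c := by
            have hky : k ∈ c :: t := (hmem k).1 (by simp)
            have hck : c ≤ k := by
              rcases List.mem_cons.1 hky with h | h
              · exact le_of_eq h.symm
              · exact hct k h
            rcases List.mem_cons.1 hcks with h | h
            · exact h.symm
            · exact absurd (hkks c h) (not_lt_of_ge hck)
          subst hkc
          have hmem' : ∀ x, x ∈ ks' ↔ x ∈ t.filter (fun x => x ≠ k) := by
            intro x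
            constructor
            · intro hx
              have hxc : k < x := hkks x hx
              have hxy : x ∈ k :: t := (hmem x).1 (List.mem_cons_of_mem _ hx)
              have hxt : x ∈ t := by
                rcases List.mem_cons.1 hxy with h | h
                · exact absurd h (ne_of_gt hxc)
                · exact h
              exact List.mem_filter.2 ⟨hxt, by simpa using ne_of_gt hxc⟩
            · intro hx
              have hxt : x ∈ t := List.mem_of_mem_filter hx
              have hxc : x ≠ k := by simpa using (List.mem_filter.1 hx).2
              have : x ∈ k :: ks' := (hmem x).2 (List.mem_cons_of_mem _ hxt)
              rcases List.mem_cons.1 this with h | h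
              · exact absurd h hxc
              · exact h
          have hcnt' : ∀ k' ∈ ks', cnt k' = ((t.filter (fun x => x ≠ k)).count k' : Int) := by
            intro k' hk'
            have hne : k' ≠ k := ne_of_gt (hkks k' hk')
            have h1 : cnt k' = ((k :: t).count k' : Int) := hcnt k' (List.mem_cons_of_mem _ hk')
            have h2 : (k :: t).count k' = t.count k' := by
              rw [List.count_cons]
              simp [Ne.symm hne]
            have h3 : (t.filter (fun x => x ≠ k)).count k' = t.count k' := by
              rw [List.count_filter]
              simp [hne]
            rw [h1, h2, ← h3]
          have hlen' : (t.filter (fun x => x ≠ k)).length ≤ n := by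
            have h1 : (t.filter (fun x => x ≠ k)).length ≤ t.length := List.length_filter_le _ _
            have h2 : t.length ≤ n := by simpa using Nat.le_of_succ_le_succ hlen
            omega
          have hpt' : (t.filter (fun x => x ≠ k)).Pairwise (· ≤ ·) := List.Pairwise.filter _ hpt
          rw [canonFCO, bSpec]
          have hcc : cnt k = ((k :: t).count k : Int) := hcnt k (by simp)
          have hoff : i + cnt k = i + 1 + (t.count k : Int) := by
            rw [hcc, List.count_cons_self]
            push_cast
            ring
          rw [← hoff]
          exact congrArg _ (ih _ _ hlen' _ cnt hpt' hqks hmem' hcnt')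
  exact fun ys ks i cnt hp hq hmem hcnt => main ys.length ys ks le_rfl i cnt hp hq hmem hcnt

theorem pv_cntAB (l : List Char) : ∀ (acc : List (PySem.Dict String Int)) (d : PySem.Dict String Int),
    l.foldl (fun st c =>
        let curr := st.2.modify (pvS1 c) 0 (· + 1)
        (st.1 ++ [curr], curr)) (acc ++ [d], d)
    = ((l.foldl (fun st c => (st.1 ++ [st.2], st.2.modify (pvS1 c) 0 (· + 1))) (acc, d)).1
        ++ [(l.foldl (fun st c => (st.1 ++ [st.2], st.2.modify (pvS1 c) 0 (· + 1))) (acc, d)).2],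
       (l.foldl (fun st c => (st.1 ++ [st.2], st.2.modify (pvS1 c) 0 (· + 1))) (acc, d)).2) := by
  intro acc d
  induction l generalizing acc d with
  | nil => simp
  | cons c t ih =>
    simp only [List.foldl_cons]
    exact ih (acc ++ [d]) (d.modify (pvS1 c) 0 (· + 1))

-- ===== VERDICT (by name: the statement is the Claim_ definition above) =====
theorem preprocess_bwt_spec : Claim_equal_preprocess_bwt := by
  intro bwt _
  unfold Spec_preprocess_bwt preprocess_bwt preprocess_bwt_alt
  dsimp only
  -- abbreviations
  set xs : List String := bwt.toList.map pvS1 with hxs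
  set ys : List String := PySem.List.sorted xs (fun c => c) false with hys
  have hfreq : bwt.toList.foldl (fun d c => d.modify (pvS1 c) 0 (· + 1)) PySem.Dict.empty
      = PySem.Dict.counter xs := by
    rw [PySem.Dict.counter_eq_foldl, hxs, List.foldl_map]
  rw [hfreq]
  set ks : List String := PySem.List.sorted (PySem.Dict.counter xs).keys (fun k => k) false with hks
  have hkeys : (PySem.Dict.counter xs).keys = PySem.Set.ofList xs := PySem.Dict.keys_counter xs
  have hqs : ks.Pairwise (· < ·) := by
    rw [hks, hkeys]
    exact PySem.List.sorted_ofList_pairwise_lt xs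
  have hp : ys.Pairwise (· ≤ ·) := PySem.List.sorted_pairwise xs (fun c => c)
  have hmem : ∀ x, x ∈ ks ↔ x ∈ ys := by
    intro x
    rw [hks, hys, PySem.List.mem_sorted, PySem.List.mem_sorted, hkeys, PySem.Set.mem_ofList]
  have hcount : ∀ k, (ys.count k : Int) = (xs.count k : Int) := by
    intro k
    exact_mod_cast congrArg Nat.cast ((PySem.List.sorted_perm xs (fun c => c) false).count_eq k)
  have hnd : ks.Nodup := by
    rw [hks, hkeys]
    exact ((PySem.List.sorted_perm _ _ _).nodup_iff).2 (PySem.Set.nodup_ofList xs)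
  -- first component
  have h1 : ((PySem.List.enumerate ys 0).foldl
        (fun d p => if d.contains p.2 then d else d.insert p.2 p.1) PySem.Dict.empty).items
      = ((ks.foldl (fun (st : PySem.Dict String Int × Int) k =>
            (st.1.insert k st.2, st.2 + (PySem.Dict.counter xs).getD k 0))
          (PySem.Dict.empty, 0)).1).items := by
    rw [pv_lemmaA ys hp 0 PySem.Dict.empty (fun x _ => PySem.Dict.contains_empty x),
        pv_bfold (fun k => (ys.count k : Int)) (PySem.Dict.counter xs)
          (fun k => by
            show ((PySem.Dict.counter xs).getD k 0) = ((ys.count k : Int))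
            rw [PySem.Dict.getD_counter]
            exact (hcount k).symm) ks PySem.Dict.empty 0
          (fun k _ => PySem.Dict.contains_empty k) hnd]
    rw [pv_canon_bspec ys ks 0 (fun k => (ys.count k : Int)) hp hqs hmem (fun k _ => rfl)]
  -- second component
  set n : Int := PySem.Str.len bwt with hn
  have hn' : n = (bwt.toList.length : Int) := by simp [hn, PySem.Str.len]
  have h0n : (0 : Int) ≤ n := by rw [hn']; positivity
  set f : List (PySem.Dict String Int) × PySem.Dict String Int → Char →
      List (PySem.Dict String Int) × PySem.Dict String Int :=
    fun st c => (st.1 ++ [st.2], st.2.modify (pvS1 c) 0 (· + 1)) with hf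
  have h2 : ((PySem.List.pyRange 0 (n + 1) 1).foldl
        (fun (st : List (PySem.Dict String Int) × PySem.Dict String Int) i =>
          if i < n then (st.1 ++ [st.2], st.2.modify (pvS1 (PySem.List.pyGetD bwt.toList i ' ')) 0 (· + 1))
          else (st.1 ++ [st.2], st.2)) ([], PySem.Dict.empty)).1
      = (bwt.toList.foldl
          (fun (st : List (PySem.Dict String Int) × PySem.Dict String Int) c =>
            (st.1 ++ [st.2.modify (pvS1 c) 0 (· + 1)], st.2.modify (pvS1 c) 0 (· + 1)))
          ([PySem.Dict.empty], PySem.Dict.empty)).1 := by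
    rw [PySem.List.pyRange_one_succ_right h0n, List.foldl_append]
    have hcong : (PySem.List.pyRange 0 n 1).foldl
        (fun (st : List (PySem.Dict String Int) × PySem.Dict String Int) i =>
          if i < n then (st.1 ++ [st.2], st.2.modify (pvS1 (PySem.List.pyGetD bwt.toList i ' ')) 0 (· + 1))
          else (st.1 ++ [st.2], st.2)) ([], PySem.Dict.empty)
        = (PySem.List.pyRange 0 n 1).foldl
          (fun st i => f st (PySem.List.pyGetD bwt.toList i ' ')) ([], PySem.Dict.empty) := by
      apply PySem.List.foldl_congr_mem
      intro acc i hi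
      have : i < n := ((PySem.List.mem_pyRange_one).1 hi).2
      simp [this, hf]
    rw [hcong]
    have hfold : (PySem.List.pyRange 0 n 1).foldl
        (fun st i => f st (PySem.List.pyGetD bwt.toList i ' ')) ([], PySem.Dict.empty)
        = bwt.toList.foldl f ([], PySem.Dict.empty) := by
      rw [hn']
      exact PySem.List.foldl_pyRange_zero_pyGetD' bwt.toList ' ' f ([], PySem.Dict.empty)
    rw [hfold]
    have hB : (bwt.toList.foldl
          (fun (st : List (PySem.Dict String Int) × PySem.Dict String Int) c =>
            (st.1 ++ [st.2.modify (pvS1 c) 0 (· + 1)], st.2.modify (pvS1 c) 0 (· + 1)))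
          ([PySem.Dict.empty], PySem.Dict.empty))
        = ((bwt.toList.foldl f ([], PySem.Dict.empty)).1
            ++ [(bwt.toList.foldl f ([], PySem.Dict.empty)).2],
           (bwt.toList.foldl f ([], PySem.Dict.empty)).2) := by
      have := pv_cntAB bwt.toList [] PySem.Dict.empty
      simpa [hf] using this
    rw [hB]
    simp
  rw [h1, h2]
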